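-- pv_equiv track=rewrite | github.com/gavinmagnus69/IGI_sem4 | lab3/lr3/Task5.py | sum_last_positive
-- ===== SOURCE A (Python) =====
-- def sum_last_positive(nums: list) -> int:
--     '''
--           Function that sums elements of the list from first to last positive
--           :parameter
--             nums: list
--           :return
--             ans: int
--     '''
--
--     #1 0 -5 -3 2 -1 -3
--     ans = 0
--     tmp_sum = 0
--     for i in nums:
--         tmp_sum += i
--         if i > 0:
--             ans += tmp_sum
--             tmp_sum = 0
--     return ans
-- ===== SOURCE B (Python) =====
-- def sum_last_positive(nums: list) -> int:
--     # Locate the last positive element, then sum the prefix through it.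
--     last = -1
--     for i, x in enumerate(nums):
--         if x > 0:
--             last = i
--     return sum(nums[:last + 1])
-- ===== Notes on version B (the rewrite author's own statement) =====
-- stated objective: simpler
-- what changed: Replaces A's flush-on-positive double accumulator (ans/tmp_sum) with a locate-then-sum structure: one pass records the index of the last positive element, then the prefix up to it is summed.
import Mathlib
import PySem

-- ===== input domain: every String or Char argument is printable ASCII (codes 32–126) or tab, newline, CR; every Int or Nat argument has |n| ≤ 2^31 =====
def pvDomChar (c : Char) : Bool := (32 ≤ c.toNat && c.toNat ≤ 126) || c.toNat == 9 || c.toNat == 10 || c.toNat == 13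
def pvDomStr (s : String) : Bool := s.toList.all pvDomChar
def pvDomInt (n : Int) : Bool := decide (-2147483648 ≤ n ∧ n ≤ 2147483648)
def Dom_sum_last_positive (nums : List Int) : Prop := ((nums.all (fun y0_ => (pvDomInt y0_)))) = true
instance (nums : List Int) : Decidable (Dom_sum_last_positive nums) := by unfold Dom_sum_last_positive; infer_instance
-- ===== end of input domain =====

-- B replaces A's flush-on-positive accumulator pair with locate-last-positive-then-sum-prefix (simpler decomposition, same cost).

-- ===== PORT A =====
-- the for-loop over nums with state (ans, tmp_sum)
def sumLastPositiveLoop (l : List Int) (ans tmpSum : Int) : Int :=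
  match l with
  | [] => ans
  | i :: rest =>
      let tmpSum' := tmpSum + i
      if i > 0 then sumLastPositiveLoop rest (ans + tmpSum') 0
      else sumLastPositiveLoop rest ans tmpSum'

def sum_last_positive (nums : List Int) : Int :=
  sumLastPositiveLoop nums 0 0

-- ===== PORT B =====
def sum_last_positive_alt (nums : List Int) : Int :=
  let last : Int :=
    (PySem.List.enumerate nums 0).foldl (fun last p => if p.2 > 0 then p.1 else last) (-1)
  (PySem.List.slice nums none (some (last + 1))).sum

-- ===== PRECONDITION & SPEC =====
def Spec_sum_last_positive (nums : List Int) (out : Int) : Prop := out = sum_last_positive_alt nums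
instance (nums : List Int) (out : Int) : Decidable (Spec_sum_last_positive nums out) := by unfold Spec_sum_last_positive; infer_instance

-- ===== CLAIM (what is proved, stated in full; the proofs are below) =====
def Claim_equal_sum_last_positive : Prop := ∀ (nums : List Int), Dom_sum_last_positive nums → Spec_sum_last_positive nums (sum_last_positive nums)

-- ===== LEMMAS AND PROOFS =====

-- index of the last positive element (recursive characterization used by both sides)
def lastPosIdx (l : List Int) : Option Nat :=
  match l with
  | [] => none
  | x :: xs =>
      match lastPosIdx xs with
      | some j => some (j + 1)
      | none => if x > 0 then some 0 else none

-- A's loop computes ans plus (tmp_sum + prefix-through-last-positive) when a positive exists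
theorem sumLastPositiveLoop_eq (l : List Int) : ∀ (ans tmp : Int),
    sumLastPositiveLoop l ans tmp =
      ans + (match lastPosIdx l with
             | none => 0
             | some j => tmp + (l.take (j + 1)).sum) := by
  induction l with
  | nil => intro ans tmp; simp [sumLastPositiveLoop, lastPosIdx]
  | cons x xs ih =>
      intro ans tmp
      simp only [sumLastPositiveLoop, lastPosIdx]
      by_cases hx : x > 0
      · simp only [hx, if_pos]
        rw [ih]
        cases h : lastPosIdx xs with
        | none => simp [List.take]
        | some j => simp [List.take]; ring
      · simp only [hx, if_false]
        rw [ih]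
        cases h : lastPosIdx xs with
        | none => simp
        | some j => simp [List.take]; ring

-- B's fold over enumerate computes the last positive index (offset by the start)
theorem foldl_enumerate_last (l : List Int) : ∀ (s a : Int),
    (PySem.List.enumerate l s).foldl (fun last p => if p.2 > 0 then p.1 else last) a =
      match lastPosIdx l with
      | none => a
      | some j => s + (j : Int) := by
  induction l with
  | nil => intro s a; simp [PySem.List.enumerate_nil, lastPosIdx]
  | cons x xs ih =>
      intro s a
      rw [PySem.List.enumerate_cons]
      simp only [List.foldl_cons, lastPosIdx]
      by_cases hx : x > 0
      · simp only [hx, if_pos]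
        rw [ih (s + 1) s]
        cases h : lastPosIdx xs with
        | none => simp
        | some j => push_cast; ring
      · simp only [hx, if_false]
        rw [ih (s + 1) a]
        cases h : lastPosIdx xs with
        | none => simp
        | some j => push_cast; ring

-- ===== VERDICT (by name: the statement is the Claim_ definition above) =====
theorem sum_last_positive_spec : Claim_equal_sum_last_positive := by
  intro nums _
  unfold Spec_sum_last_positive sum_last_positive sum_last_positive_alt
  rw [sumLastPositiveLoop_eq, foldl_enumerate_last nums 0 (-1)]
  cases h : lastPosIdx nums with
  | none =>
      have h0 : ((-1 : Int) + 1) = ((0 : Nat) : Int) := by norm_num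
      simp only [h0, PySem.List.slice_to_natCast]
      simp
  | some j =>
      have h0 : ((0 : Int) + (j : Int) + 1) = (((j + 1 : Nat)) : Int) := by push_cast; ring
      simp only [h0, PySem.List.slice_to_natCast]
      simp
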